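-- pv_equiv track=rewrite | github.com/GlebSmol23/BelHard | 9_3.py | generate_array_of_numbers
-- ===== SOURCE A (Python) =====
-- def generate_array_of_numbers(n: int) -> list[list[int]]:
--     numbers: list[list[int]] = []
--
--     for j in range(n):
--         raw: list[int] = []
--         for i in range(n):
--             if i == j:
--                 raw.append(3)
--             elif i > j:
--                 raw.append(2)
--             else:
--                 raw.append(1)
--         numbers.append(raw)
--     return numbers
-- ===== SOURCE B (Python) =====
-- def generate_array_of_numbers(n: int) -> list[list[int]]:
--     return [[1] * j + [3] + [2] * (n - j - 1) for j in range(n)]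
-- ===== Notes on version B (the rewrite author's own statement) =====
-- stated objective: simpler
-- what changed: Replaces the nested per-cell comparison loops with a one-line comprehension that builds each row from three homogeneous runs ([1]*j + [3] + [2]*(n-j-1)) determined by the diagonal position.
import Mathlib
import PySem

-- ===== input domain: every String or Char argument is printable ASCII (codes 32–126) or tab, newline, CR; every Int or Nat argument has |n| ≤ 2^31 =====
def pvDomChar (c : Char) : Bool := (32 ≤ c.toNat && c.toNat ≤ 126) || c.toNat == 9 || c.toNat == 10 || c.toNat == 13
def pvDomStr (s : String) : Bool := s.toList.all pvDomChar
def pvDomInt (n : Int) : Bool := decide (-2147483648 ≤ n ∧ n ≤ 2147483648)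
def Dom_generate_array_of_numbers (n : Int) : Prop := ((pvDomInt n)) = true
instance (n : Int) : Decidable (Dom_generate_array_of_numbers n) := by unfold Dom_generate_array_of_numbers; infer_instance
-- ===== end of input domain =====

-- B replaces the nested per-cell comparison loops with rows built from three homogeneous runs (simpler).


-- ===== PORT A =====
def generate_array_of_numbers (n : Int) : List (List Int) :=
  (PySem.List.pyRange 0 n 1).foldl (fun numbers j =>
    numbers ++ [(PySem.List.pyRange 0 n 1).foldl (fun raw i =>
      if i == j then raw ++ [3]
      else if i > j then raw ++ [2]
      else raw ++ [1]) []]) []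

-- ===== PORT B =====
def generate_array_of_numbers_alt (n : Int) : List (List Int) :=
  (PySem.List.pyRange 0 n 1).map (fun j =>
    List.replicate j.toNat 1 ++ [3] ++ List.replicate (n - j - 1).toNat 2)

-- ===== PRECONDITION & SPEC =====
def Spec_generate_array_of_numbers (n : Int) (out : List (List Int)) : Prop := out = generate_array_of_numbers_alt n
instance (n : Int) (out : List (List Int)) : Decidable (Spec_generate_array_of_numbers n out) := by unfold Spec_generate_array_of_numbers; infer_instance

-- ===== CLAIM =====
def Claim_equal_generate_array_of_numbers : Prop := ∀ (n : Int), Dom_generate_array_of_numbers n → Spec_generate_array_of_numbers n (generate_array_of_numbers n)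

-- ===== LEMMAS AND PROOFS =====

-- map to a constant over any list is a replicate
lemma map_const_of_mem {α : Type} (l : List α) (f : α → Int) (c : Int)
    (h : ∀ x ∈ l, f x = c) : l.map f = List.replicate l.length c := by
  induction l with
  | nil => rfl
  | cons a t ih =>
    simp only [List.map_cons, List.length_cons, List.replicate_succ]
    rw [h a (by simp), ih (fun x hx => h x (by simp [hx]))]

-- the inner loop at row j produces the three-run row
lemma inner_row (n j : Int) (h0 : 0 ≤ j) (h1 : j < n) :
    (PySem.List.pyRange 0 n 1).foldl (fun raw i =>
      if i == j then raw ++ [3]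
      else if i > j then raw ++ [2]
      else raw ++ [1]) ([] : List Int)
    = List.replicate j.toNat 1 ++ [3] ++ List.replicate (n - j - 1).toNat 2 := by
  have hf : (fun (raw : List Int) (i : Int) =>
      if i == j then raw ++ [3] else if i > j then raw ++ [2] else raw ++ [1])
      = (fun raw i => raw ++ [if i == j then 3 else if i > j then 2 else 1]) := by
    funext raw i; split_ifs <;> rfl
  rw [hf, PySem.List.foldl_append_singleton_eq_map, List.nil_append,
      PySem.List.pyRange_one_append 0 j n h0 (le_of_lt h1), PySem.List.pyRange_one_cons h1,
      List.map_append, List.map_cons, List.append_assoc]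
  congr 1
  · rw [map_const_of_mem _ _ 1 (fun x hx => by
        rcases (PySem.List.mem_pyRange_one).mp hx with ⟨_, hlt⟩
        simp [Int.ne_of_lt hlt, not_lt.mpr (le_of_lt hlt)]),
      PySem.List.length_pyRange_one]
    simp
  · simp only [beq_self_eq_true, if_true, List.singleton_append, List.cons.injEq, true_and]
    rw [map_const_of_mem _ _ 2 (fun x hx => by
        rcases (PySem.List.mem_pyRange_one).mp hx with ⟨hge, _⟩
        have hx2 : j < x := by omega
        simp [Int.ne_of_gt hx2, hx2]),
      PySem.List.length_pyRange_one]
    have : n - (j + 1) = n - j - 1 := by ring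
    rw [this]

-- ===== VERDICT =====
theorem generate_array_of_numbers_spec : Claim_equal_generate_array_of_numbers := by
  intro n _
  unfold Spec_generate_array_of_numbers generate_array_of_numbers generate_array_of_numbers_alt
  rw [PySem.List.foldl_append_singleton_eq_map]
  refine (List.nil_append _).trans (List.map_congr_left ?_)
  intro j hj
  rcases (PySem.List.mem_pyRange_one).mp hj with ⟨h0, h1⟩
  exact inner_row n j h0 h1
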